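-- pv_equiv track=rewrite | github.com/iamlaboniraz/my-google-foobar-experience | level04_01_Free_the_bunny_Prisoners.py | solution
-- ===== SOURCE A (Python) =====
-- from itertools import combinations
--
-- def solution(num_buns, num_required):
--     # Your code here
--     AllKey = []
--     com = list(combinations(range(0,num_buns),num_buns-num_required+1))
--     for i in range(0,num_buns):
--         AllKey.append([])
--     key = 0
--     for value in com:
--         [AllKey[j].append(key) for j in value]
--         key+=1
--     return AllKey
-- ===== SOURCE B (Python) =====
-- from itertools import combinations
--
-- def solution(num_buns, num_required):
--     com = list(combinations(range(num_buns), num_buns - num_required + 1))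
--     sets = [set(c) for c in com]
--     return [[k for k, c in enumerate(sets) if i in c] for i in range(num_buns)]
-- ===== Notes on version B (the rewrite author's own statement) =====
-- stated objective: idiomatic
-- what changed: B transposes A's scatter loop: instead of distributing each key into the rows of its combination's bunnies, B builds each bunny's key list directly by filtering the enumerated combinations (converted to sets once) for membership.
import Mathlib
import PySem

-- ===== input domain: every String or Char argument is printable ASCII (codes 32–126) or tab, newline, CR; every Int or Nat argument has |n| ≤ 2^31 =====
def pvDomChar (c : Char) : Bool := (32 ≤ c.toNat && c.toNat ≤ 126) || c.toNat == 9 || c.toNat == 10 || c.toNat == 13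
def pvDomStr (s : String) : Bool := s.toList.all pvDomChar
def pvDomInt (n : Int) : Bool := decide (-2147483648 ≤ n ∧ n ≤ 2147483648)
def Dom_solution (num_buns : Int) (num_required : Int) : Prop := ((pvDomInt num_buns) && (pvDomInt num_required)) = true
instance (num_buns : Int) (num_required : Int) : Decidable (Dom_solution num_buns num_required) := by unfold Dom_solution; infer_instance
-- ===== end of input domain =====

-- B builds each bunny's key list by filtering the enumerated combinations for membership
-- (a transpose of A's per-combination scatter); same values, no speed claim.

-- ===== PORT A =====
-- itertools.combinations(xs, k) in lexicographic order (shared helper for both ports)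
def combs : List Int → Nat → List (List Int)
  | _, 0 => [[]]
  | [], _ + 1 => []
  | x :: xs, k + 1 =>
    -- length pruning (combinations(xs, r) is empty when r > len(xs)); does not change the value
    if xs.length < k then []
    else (combs xs k).map (fun c => x :: c) ++ combs xs (k + 1)

-- literal port of A: build empty rows, then for each combination append the key into each member's row.
-- (num_buns - num_required + 1).toNat is exact on Pre_solution (Python raises ValueError when it is negative).
def solution (num_buns : Int) (num_required : Int) : List (List Int) :=
  let com := combs (PySem.List.pyRange 0 num_buns 1) (num_buns - num_required + 1).toNat
  let allKey := (PySem.List.pyRange 0 num_buns 1).foldl (fun acc _ => acc ++ [([] : List Int)]) []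
  let res := com.foldl
    (fun (st : List (List Int) × Int) value =>
      (value.foldl (fun ak j =>
          PySem.List.pySetD ak j (PySem.List.pyGetD ak j [] ++ [st.2])) st.1,
       st.2 + 1))
    (allKey, 0)
  res.1

-- ===== PORT B =====
-- tail-recursive list(enumerate(xs)) (equals PySem.List.enumerate xs 0; proved below)
def enumFrom {α : Type} (s : Int) (xs : List α) : List (Int × α) :=
  (xs.foldl (fun (acc : List (Int × α) × Int) x => ((acc.2, x) :: acc.1, acc.2 + 1)) ([], s)).1.reverse

def solution_alt (num_buns : Int) (num_required : Int) : List (List Int) :=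
  let com := combs (PySem.List.pyRange 0 num_buns 1) (num_buns - num_required + 1).toNat
  let sets := com.map (fun c => PySem.Set.ofList c)
  (PySem.List.pyRange 0 num_buns 1).map (fun i =>
    ((enumFrom 0 sets).filter (fun p => p.2.contains i)).map (fun p => p.1))

-- ===== PRECONDITION & SPEC =====
-- Pre_ excludes exactly the inputs where Python A raises ValueError
-- (combinations with negative r, i.e. num_buns - num_required + 1 < 0); B raises there too.
def Pre_solution (num_buns : Int) (num_required : Int) : Prop :=
  0 ≤ num_buns - num_required + 1
instance (num_buns : Int) (num_required : Int) : Decidable (Pre_solution num_buns num_required) := by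
  unfold Pre_solution; infer_instance

def pvWitness_solution : Int × Int := (4, 4)

def Spec_solution (num_buns : Int) (num_required : Int) (out : List (List Int)) : Prop :=
  out = solution_alt num_buns num_required
instance (num_buns : Int) (num_required : Int) (out : List (List Int)) : Decidable (Spec_solution num_buns num_required out) := by
  unfold Spec_solution; infer_instance

-- ===== CLAIM (what is proved, stated in full; the proofs are below) =====
def Claim_equal_solution : Prop := ∀ (num_buns : Int) (num_required : Int), Dom_solution num_buns num_required → Pre_solution num_buns num_required → Spec_solution num_buns num_required (solution num_buns num_required)

-- ===== LEMMAS AND PROOFS =====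

-- enumFrom is list(enumerate(xs, s))
theorem enumFrom_foldl {α : Type} (xs : List α) (acc : List (Int × α)) (s : Int) :
    xs.foldl (fun (acc : List (Int × α) × Int) x => ((acc.2, x) :: acc.1, acc.2 + 1)) (acc, s)
      = ((PySem.List.enumerate xs s).reverse ++ acc, s + xs.length) := by
  induction xs generalizing acc s with
  | nil => simp [PySem.List.enumerate_nil]
  | cons x xs ih =>
    rw [List.foldl_cons, ih, PySem.List.enumerate_cons]
    simp [List.append_assoc]
    omega

theorem enumFrom_eq_enumerate {α : Type} (xs : List α) :
    enumFrom 0 xs = PySem.List.enumerate xs 0 := by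
  unfold enumFrom
  rw [enumFrom_foldl]
  simp

-- set(c) does not change membership: filtering the enumerated sets picks the same keys
theorem filter_enumerate_ofList (com : List (List Int)) (s : Int) (x : Int) :
    ((PySem.List.enumerate (com.map (fun c => PySem.Set.ofList c)) s).filter
        (fun p => p.2.contains x)).map (fun p => p.1)
      = ((PySem.List.enumerate com s).filter (fun p => p.2.contains x)).map (fun p => p.1) := by
  induction com generalizing s with
  | nil => simp [PySem.List.enumerate_nil]
  | cons c rest ih =>
    rw [List.map_cons, PySem.List.enumerate_cons, PySem.List.enumerate_cons]
    by_cases hx : x ∈ c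
    · simp [PySem.Set.mem_ofList, hx]
      simpa using ih (s + 1)
    · simp [PySem.Set.mem_ofList, hx]
      simpa using ih (s + 1)

-- every combination is a sublist of the source list
theorem combs_sublist {xs c : List Int} {k : Nat} (h : c ∈ combs xs k) : c.Sublist xs := by
  induction xs generalizing k c with
  | nil =>
    cases k with
    | zero => simp [combs] at h; simp [h]
    | succ k => simp [combs] at h
  | cons x xs ih =>
    cases k with
    | zero => simp [combs] at h; simp [h]
    | succ k =>
      simp only [combs] at h
      by_cases hlen : xs.length < k
      · simp [hlen] at h
      · simp only [hlen, ite_false, List.mem_append, List.mem_map] at h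
        rcases h with ⟨c', hc', rfl⟩ | h
        · exact (ih hc').cons₂ x
        · exact (ih h).cons x

-- the inner scatter fold preserves the row count
theorem inner_len (value : List Int) (ak : List (List Int)) (key : Int) :
    (value.foldl (fun a j => PySem.List.pySetD a j (PySem.List.pyGetD a j [] ++ [key])) ak).length
      = ak.length := by
  induction value generalizing ak with
  | nil => rfl
  | cons j rest ih => simp [List.foldl_cons, ih, PySem.List.length_pySetD]

-- one combination's scatter: row n gains [key] iff n is in the combination
theorem inner_row (value : List Int) (ak : List (List Int)) (key : Int)
    (hnd : value.Nodup)
    (hb : ∀ j ∈ value, 0 ≤ j ∧ j < (ak.length : Int))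
    (n : Nat) (hn : n < ak.length) :
    (value.foldl (fun a j => PySem.List.pySetD a j (PySem.List.pyGetD a j [] ++ [key])) ak)[n]?
      = some (ak[n] ++ if ((n : Int) ∈ value) then [key] else []) := by
  induction value generalizing ak with
  | nil => simp [List.getElem?_eq_getElem hn]
  | cons j rest ih =>
    obtain ⟨hj0, hjlt⟩ := hb j (by simp)
    have hjnat : j.toNat < ak.length := by omega
    have hset : PySem.List.pySetD ak j (PySem.List.pyGetD ak j [] ++ [key])
        = ak.set j.toNat (ak[j.toNat] ++ [key]) := by
      rw [PySem.List.pySetD_of_nonneg ak _ hj0, PySem.List.pyGetD_of_nonneg ak _ hj0,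
        List.getD_eq_getElem?_getD, List.getElem?_eq_getElem hjnat]
      rfl
    rw [List.foldl_cons, hset,
      ih (ak.set j.toNat (ak[j.toNat] ++ [key]))
        (List.nodup_cons.mp hnd).2
        (by intro x hx; have := hb x (by simp [hx]); simpa using this)
        (by simpa using hn)]
    have hget : (ak.set j.toNat (ak[j.toNat] ++ [key]))[n]'(by simpa using hn)
        = if n = j.toNat then ak[n] ++ [key] else ak[n] := by
      rw [List.getElem_set]
      by_cases hnj : n = j.toNat
      · simp [hnj]
      · rw [if_neg (by omega), if_neg hnj]
    rw [hget]
    by_cases hnj : n = j.toNat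
    · have hje : (n : Int) = j := by omega
      have hnr : (n : Int) ∉ rest := by rw [hje]; exact (List.nodup_cons.mp hnd).1
      rw [if_pos hnj, if_neg hnr, if_pos (show ((n : Int)) ∈ j :: rest by simp [hje]),
        List.append_nil]
    · have hje : ¬ ((n : Int) = j) := by omega
      rw [if_neg hnj]
      simp [List.mem_cons, hje]

-- the outer fold preserves the row count
theorem outer_len (com : List (List Int)) (ak : List (List Int)) (key : Int) :
    ((com.foldl
      (fun (st : List (List Int) × Int) value =>
        (value.foldl (fun a j =>
            PySem.List.pySetD a j (PySem.List.pyGetD a j [] ++ [st.2])) st.1,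
         st.2 + 1))
      (ak, key)).1).length = ak.length := by
  induction com generalizing ak key with
  | nil => rfl
  | cons c rest ih => rw [List.foldl_cons, ih, inner_len]

-- the outer fold's row n is the filter of the enumerated combinations containing n
theorem outer_row (com : List (List Int)) (ak : List (List Int)) (key : Int)
    (h : ∀ c ∈ com, c.Nodup ∧ ∀ j ∈ c, 0 ≤ j ∧ j < (ak.length : Int))
    (n : Nat) (hn : n < ak.length) :
    ((com.foldl
      (fun (st : List (List Int) × Int) value =>
        (value.foldl (fun a j =>
            PySem.List.pySetD a j (PySem.List.pyGetD a j [] ++ [st.2])) st.1,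
         st.2 + 1))
      (ak, key)).1)[n]?
      = some (ak[n] ++
          ((PySem.List.enumerate com key).filter (fun p => p.2.contains (n : Int))).map (fun p => p.1)) := by
  induction com generalizing ak key with
  | nil => simp [PySem.List.enumerate_nil, List.getElem?_eq_getElem hn]
  | cons c rest ih =>
    obtain ⟨hnd, hb⟩ := h c (by simp)
    have hlen := inner_len c ak key
    rw [List.foldl_cons]
    rw [ih (c.foldl (fun a j => PySem.List.pySetD a j (PySem.List.pyGetD a j [] ++ [key])) ak) (key + 1)
        (by intro c' hc'; have := h c' (by simp [hc']); rw [hlen]; exact this)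
        (by rw [hlen]; exact hn)]
    have hinner := inner_row c ak key hnd hb n hn
    have : (c.foldl (fun a j => PySem.List.pySetD a j (PySem.List.pyGetD a j [] ++ [key])) ak)[n]
        = ak[n] ++ if ((n : Int) ∈ c) then [key] else [] := by
      have := hinner
      rwa [List.getElem?_eq_getElem (by rw [hlen]; exact hn), Option.some_inj] at this
    rw [this]
    rw [PySem.List.enumerate_cons]
    by_cases hmem : (n : Int) ∈ c
    · simp [hmem, List.append_assoc]
    · simp [hmem]

-- the initial AllKey loop builds a replicate of empty rows
theorem foldl_append_nil (xs : List Int) (acc : List (List Int)) :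
    xs.foldl (fun acc _ => acc ++ [([] : List Int)]) acc
      = acc ++ List.replicate xs.length ([] : List Int) := by
  induction xs generalizing acc with
  | nil => simp
  | cons x xs ih => simp [List.foldl_cons, ih, List.append_assoc, List.replicate_succ]

-- ===== VERDICT (by name: the statement is the Claim_ definition above) =====
theorem solution_spec : Claim_equal_solution := by
  intro nb nr _ _
  unfold Spec_solution solution solution_alt
  simp only []
  set rng := PySem.List.pyRange 0 nb 1 with hrng
  set com := combs rng (nb - nr + 1).toNat with hcom
  have hak : rng.foldl (fun acc _ => acc ++ [([] : List Int)]) []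
      = List.replicate rng.length ([] : List Int) := by
    simp [foldl_append_nil rng []]
  have hrlen : rng.length = nb.toNat := by
    simp [hrng, PySem.List.length_pyRange_one]
  have hcprop : ∀ c ∈ com, c.Nodup ∧ ∀ j ∈ c, 0 ≤ j ∧ j < ((List.replicate rng.length ([] : List Int)).length : Int) := by
    intro c hc
    have hsub := combs_sublist hc
    constructor
    · exact hsub.nodup (by simpa [hrng] using PySem.List.nodup_pyRange_one 0 nb)
    · intro j hj
      have hjr : j ∈ rng := hsub.mem hj
      rw [hrng, PySem.List.mem_pyRange_one] at hjr
      simp only [List.length_replicate]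
      constructor
      · exact hjr.1
      · rw [hrlen]; omega
  rw [hak]
  apply List.ext_getElem?
  intro n
  by_cases hn : n < nb.toNat
  · rw [outer_row com _ 0 hcprop n (by simp [List.length_replicate, hrlen, hn]),
      ← filter_enumerate_ofList com 0 ((n : Int)), ← enumFrom_eq_enumerate]
    have hBn : ((rng.map (fun i =>
        ((enumFrom 0 (com.map (fun c => PySem.Set.ofList c))).filter
          (fun p => p.2.contains i)).map (fun p => p.1))))[n]?
        = some (((enumFrom 0 (com.map (fun c => PySem.Set.ofList c))).filter
            (fun p => p.2.contains ((n : Int)))).map (fun p => p.1)) := by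
      have hnbeq : nb = ((nb.toNat : Nat) : Int) := by omega
      rw [hrng, hnbeq]
      exact PySem.List.getElem?_map_pyRange_zero
        (fun i => ((enumFrom 0 (com.map (fun c => PySem.Set.ofList c))).filter
          (fun p => p.2.contains i)).map (fun p => p.1))
        nb.toNat n hn
    rw [hBn]
    simp [List.getElem_replicate, hrlen]
  · rw [List.getElem?_eq_none, List.getElem?_eq_none]
    · simp [hrng, PySem.List.length_pyRange_one]; omega
    · rw [outer_len, List.length_replicate, hrlen]; omega
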